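-- pv_equiv track=rewrite | github.com/nta5/Text_Adventure_Game | game.py | check_character_level
-- ===== SOURCE A (Python) =====
-- import itertools
--
-- def check_character_level(character: dict) -> bool:
--     """
--     Check if a character is eligible to level up.
--
--     :param character: a dictionary
--     :precondition: character must be a dictionary with the keys 'Level' and 'Experience'
--     :postcondition: checks character's 'Experience' and decides if character can level up
--
--     >>> test_character = {'Level': 1, 'Experience': 1030}
--     >>> check_character_level(test_character)
--     True
--
--     >>> test_character = {'Level': 2, 'Experience': 2000}
--     >>> check_character_level(test_character)
--     True
--
--     >>> test_character = {'Level': 2, 'Experience': 1999}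
--     >>> check_character_level(test_character)
--     False
--     """
--     experience_each_level = [1000, 1000, 1500]
--     total_experience_needed = list(itertools.accumulate(experience_each_level))
--
--     level_up = False
--
--     for level, total_experience in enumerate(total_experience_needed, 1):
--         if character['Level'] == level and character['Experience'] >= total_experience:
--             level_up = True
--
--     return level_up
-- ===== SOURCE B (Python) =====
-- COSTS = (1000, 1000, 1500)
--
--
-- def check_character_level(character: dict) -> bool:
--     """Recursively pay the per-level costs out of the experience pool:
--     the character can level up iff the remaining experience after paying
--     the first `Level` costs is still non-negative."""
--     def pay(level, exp):
--         # True iff exp covers the first `level` per-level costs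
--         if level == 0:
--             return exp >= 0
--         return pay(level - 1, exp - COSTS[level - 1])
--
--     level = character['Level']
--     return 1 <= level <= 3 and pay(level, character['Experience'])
-- ===== Notes on version B (the rewrite author's own statement) =====
-- stated objective: alternative
-- what changed: Instead of building the cumulative-threshold list and scanning every level comparing cumulative sums, B recursively pays the per-level costs out of the experience pool and checks that the remainder after the character's level is non-negative.
import Mathlib
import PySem

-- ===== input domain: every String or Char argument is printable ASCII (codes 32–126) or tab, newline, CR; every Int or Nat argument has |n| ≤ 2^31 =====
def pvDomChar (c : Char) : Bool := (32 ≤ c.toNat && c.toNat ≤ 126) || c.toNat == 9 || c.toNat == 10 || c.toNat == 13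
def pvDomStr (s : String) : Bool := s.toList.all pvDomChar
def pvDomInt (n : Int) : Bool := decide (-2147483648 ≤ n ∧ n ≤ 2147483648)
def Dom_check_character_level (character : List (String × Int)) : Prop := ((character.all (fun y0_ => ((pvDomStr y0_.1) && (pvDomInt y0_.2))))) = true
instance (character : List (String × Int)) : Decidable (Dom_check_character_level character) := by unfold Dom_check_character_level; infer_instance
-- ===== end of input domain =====

-- B replaces A's accumulate-then-scan over every level by recursively paying the
-- per-level costs out of the experience pool and testing the remainder (objective: alternative).

-- dict subscription d[k]: first-match lookup, total form used under Pre_ (key present)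
def pvKeyD (character : List (String × Int)) (k : String) : Int :=
  (character.lookup k).getD 0

-- ===== PORT A =====
def check_character_level (character : List (String × Int)) : Bool :=
  let experience_each_level : List Int := [1000, 1000, 1500]
  -- itertools.accumulate: running sums, built left to right
  let total_experience_needed : List Int :=
    (experience_each_level.foldl
      (fun (st : List Int × Int) x => let s := st.2 + x; (st.1 ++ [s], s)) ([], 0)).1
  (PySem.List.enumerate total_experience_needed 1).foldl
    (fun level_up p =>
      if pvKeyD character "Level" = p.1 ∧ pvKeyD character "Experience" ≥ p.2 then true
      else level_up) false

-- ===== PORT B =====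
-- COSTS[level-1]: index is in range whenever pvPay is reached (1 ≤ level ≤ 3), so
-- plain getD is exact here.
def pvPay (level : Nat) (exp : Int) : Bool :=
  match level with
  | 0 => decide (exp ≥ 0)
  | Nat.succ n => pvPay n (exp - ([1000, 1000, 1500] : List Int).getD n 0)

def check_character_level_alt (character : List (String × Int)) : Bool :=
  let level := pvKeyD character "Level"
  decide (1 ≤ level ∧ level ≤ 3) && pvPay level.toNat (pvKeyD character "Experience")

-- ===== PRECONDITION & SPEC =====
-- Pre_ excludes exactly the inputs where A raises KeyError: 'Level' missing, or
-- 'Experience' missing while 'Level' is 1, 2 or 3 (short-circuit `and` reads it only then).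
-- B raises on exactly the same inputs.
def Pre_check_character_level (character : List (String × Int)) : Prop :=
  (character.lookup "Level").isSome = true ∧
  ((character.lookup "Level" = some 1 ∨ character.lookup "Level" = some 2 ∨
    character.lookup "Level" = some 3) → (character.lookup "Experience").isSome = true)
instance (character : List (String × Int)) : Decidable (Pre_check_character_level character) := by
  unfold Pre_check_character_level; infer_instance
def pvWitness_check_character_level : (List (String × Int)) := [("Level", 1), ("Experience", 1030)]

def Spec_check_character_level (character : List (String × Int)) (out : Bool) : Prop := out = check_character_level_alt character
instance (character : List (String × Int)) (out : Bool) : Decidable (Spec_check_character_level character out) := by unfold Spec_check_character_level; infer_instance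

-- ===== CLAIM (what is proved, stated in full; the proofs are below) =====
def Claim_equal_check_character_level : Prop := ∀ (character : List (String × Int)), Dom_check_character_level character → Pre_check_character_level character → Spec_check_character_level character (check_character_level character)

-- ===== LEMMAS AND PROOFS =====

-- common closed form of both programs, as a function of the two looked-up values
def pvClosed (lvl exp : Int) : Bool :=
  if lvl = 1 then decide (exp ≥ 1000)
  else if lvl = 2 then decide (exp ≥ 2000)
  else if lvl = 3 then decide (exp ≥ 3500) else false

theorem a_eval (character : List (String × Int)) :
    check_character_level character =
      pvClosed (pvKeyD character "Level") (pvKeyD character "Experience") := by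
  simp only [check_character_level, pvClosed]
  norm_num [List.foldl]
  split_ifs <;> simp_all

theorem b_eval (character : List (String × Int)) :
    check_character_level_alt character =
      pvClosed (pvKeyD character "Level") (pvKeyD character "Experience") := by
  unfold check_character_level_alt pvClosed
  set lvl := pvKeyD character "Level" with hl
  set exp := pvKeyD character "Experience" with he
  split_ifs with h1 h2 h3
  · rw [h1]; simp [pvPay] <;> omega
  · rw [h2]; simp [pvPay] <;> omega
  · rw [h3]; simp [pvPay] <;> omega
  · rcases Classical.em (1 ≤ lvl ∧ lvl ≤ 3) with h | h
    · exfalso; omega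
    · simp [h]

-- ===== VERDICT (by name: the statement is the Claim_ definition above) =====
theorem check_character_level_spec : Claim_equal_check_character_level := by
  intro character _ _
  unfold Spec_check_character_level
  rw [a_eval, b_eval]
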